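-- pv_equiv track=rewrite | github.com/ronitraii/SmartHire | NLP Based/app.py | normalize_skills
-- ===== SOURCE A (Python) =====
-- synonym_dict = {
--     "machine learning": ["ml", "deep learning", "artificial intelligence"],
--     "data scientist": ["data science", "research scientist"],
--     "nlp": ["natural language processing"],
--     "python": ["py"],
-- }
--
-- def normalize_skills(resume_skills):
--     normalized_resume_skills = set()
--     for skill in resume_skills:
--         matched = False
--         for key, synonyms in synonym_dict.items():
--             if skill in synonyms or skill == key:
--                 normalized_resume_skills.add(key)
--                 matched = True
--                 break
--         if not matched:
--             normalized_resume_skills.add(skill)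
--     return normalized_resume_skills
-- ===== SOURCE B (Python) =====
-- synonym_dict = {
--     "machine learning": ["ml", "deep learning", "artificial intelligence"],
--     "data scientist": ["data science", "research scientist"],
--     "nlp": ["natural language processing"],
--     "python": ["py"],
-- }
--
-- # canonical name of every known alias (keys map to themselves), built once
-- _CANON = {}
-- for _key, _syns in synonym_dict.items():
--     for _name in (_key, *_syns):
--         _CANON[_name] = _key
--
-- def normalize_skills(resume_skills):
--     # divide and conquer: normalize each half independently, merge by set union
--     n = len(resume_skills)
--     if n == 0:
--         return set()
--     if n == 1:
--         skill = resume_skills[0]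
--         return {_CANON.get(skill, skill)}
--     mid = n // 2
--     return normalize_skills(resume_skills[:mid]) | normalize_skills(resume_skills[mid:])
-- ===== Notes on version B (the rewrite author's own statement) =====
-- stated objective: alternative
-- what changed: B normalizes by divide and conquer: it flattens the synonym table into one alias-to-canonical map built once, splits the skill list in halves, normalizes each half recursively and merges the results with set union, instead of A's single pass with a per-skill inner scan of the nested table.
import Mathlib
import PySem

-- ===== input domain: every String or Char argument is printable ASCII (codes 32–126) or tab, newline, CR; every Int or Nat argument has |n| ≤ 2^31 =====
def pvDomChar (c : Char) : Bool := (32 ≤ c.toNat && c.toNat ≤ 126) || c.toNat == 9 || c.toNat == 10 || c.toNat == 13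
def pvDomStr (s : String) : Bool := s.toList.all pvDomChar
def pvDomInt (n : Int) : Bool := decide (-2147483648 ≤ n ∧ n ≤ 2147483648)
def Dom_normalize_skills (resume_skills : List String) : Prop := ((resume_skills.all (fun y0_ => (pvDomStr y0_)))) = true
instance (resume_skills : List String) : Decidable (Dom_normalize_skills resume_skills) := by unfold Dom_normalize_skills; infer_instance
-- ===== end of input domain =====

-- B replaces A's single pass with a per-skill inner scan of the nested synonym table by divide and conquer:
-- a flattened alias->canonical map built once, recursive normalization of the two halves, merged by set union (alternative; same result).

-- ===== PORT A =====
def synonym_dict : List (String × List String) :=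
  [("machine learning", ["ml", "deep learning", "artificial intelligence"]),
   ("data scientist", ["data science", "research scientist"]),
   ("nlp", ["natural language processing"]),
   ("python", ["py"])]

-- inner 'for key, synonyms … break' loop = first matching entry
def normalize_skills (resume_skills : List String) : List String :=
  resume_skills.foldl
    (fun acc skill =>
      match synonym_dict.find? (fun kv => kv.2.contains skill || skill == kv.1) with
      | some kv => PySem.Set.add acc kv.1
      | none => PySem.Set.add acc skill)
    PySem.Set.empty

-- ===== PORT B =====
-- module-level construction of the flattened alias->canonical table _CANON, as in Source B
def canonDict : PySem.Dict String String :=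
  synonym_dict.foldl
    (fun d kv => kv.2.foldl (fun d' s => d'.insert s kv.1) (d.insert kv.1 kv.1))
    PySem.Dict.empty

-- the recursion of Source B's normalize_skills, with a structural fuel counter (fuel = list length
-- suffices: each recursive call is on a strictly shorter list) so the definition computes
def altFuel (fuel : Nat) (resume_skills : List String) : List String :=
  match fuel with
  | 0 => PySem.Set.empty               -- unreachable for fuel ≥ len(resume_skills) > 0
  | fuel + 1 =>
    let n := resume_skills.length      -- n = len(resume_skills); Python int, here ≥ 0 so kept as Nat
    if n = 0 then PySem.Set.empty
    else if n = 1 then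
      let skill := resume_skills.headI -- resume_skills[0]; in range since n = 1
      [canonDict.getD skill skill]
    else
      let mid := n / 2                 -- n // 2 (n ≥ 0, so Nat division agrees with Python's floor division)
      PySem.Set.union
        (altFuel fuel (PySem.List.slice resume_skills none (some (mid : Int))))
        (altFuel fuel (PySem.List.slice resume_skills (some (mid : Int)) none))

def normalize_skills_alt (resume_skills : List String) : List String :=
  altFuel resume_skills.length resume_skills

-- ===== PRECONDITION & SPEC =====
def Spec_normalize_skills (resume_skills : List String) (out : List String) : Prop := out = normalize_skills_alt resume_skills
instance (resume_skills : List String) (out : List String) : Decidable (Spec_normalize_skills resume_skills out) := by unfold Spec_normalize_skills; infer_instance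

-- ===== CLAIM (what is proved, stated in full; the proofs are below) =====
def Claim_equal_normalize_skills : Prop := ∀ (resume_skills : List String), Dom_normalize_skills resume_skills → Spec_normalize_skills resume_skills (normalize_skills resume_skills)

-- ===== LEMMAS AND PROOFS =====

-- the canonical form both programs compute for one skill
def canon (s : String) : String := canonDict.getD s s

-- A's inner scan computes canon
lemma inner_eq (s : String) :
    (match synonym_dict.find? (fun kv => kv.2.contains s || s == kv.1) with
     | some kv => kv.1
     | none => s) = canon s := by
  by_cases h1 : s = "machine learning"; · subst h1; decide
  by_cases h2 : s = "ml"; · subst h2; decide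
  by_cases h3 : s = "deep learning"; · subst h3; decide
  by_cases h4 : s = "artificial intelligence"; · subst h4; decide
  by_cases h5 : s = "data scientist"; · subst h5; decide
  by_cases h6 : s = "data science"; · subst h6; decide
  by_cases h7 : s = "research scientist"; · subst h7; decide
  by_cases h8 : s = "nlp"; · subst h8; decide
  by_cases h9 : s = "natural language processing"; · subst h9; decide
  by_cases h10 : s = "python"; · subst h10; decide
  by_cases h11 : s = "py"; · subst h11; decide
  have hrev : canonDict = PySem.Dict.mk
      [("machine learning", "machine learning"), ("ml", "machine learning"),
       ("deep learning", "machine learning"), ("artificial intelligence", "machine learning"),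
       ("data scientist", "data scientist"), ("data science", "data scientist"),
       ("research scientist", "data scientist"), ("nlp", "nlp"),
       ("natural language processing", "nlp"), ("python", "python"), ("py", "python")] := by decide
  have e1 : (s == "machine learning") = false := by simpa using h1
  have e2 : (s == "ml") = false := by simpa using h2
  have e3 : (s == "deep learning") = false := by simpa using h3
  have e4 : (s == "artificial intelligence") = false := by simpa using h4
  have e5 : (s == "data scientist") = false := by simpa using h5
  have e6 : (s == "data science") = false := by simpa using h6
  have e7 : (s == "research scientist") = false := by simpa using h7
  have e8 : (s == "nlp") = false := by simpa using h8
  have e9 : (s == "natural language processing") = false := by simpa using h9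
  have e10 : (s == "python") = false := by simpa using h10
  have e11 : (s == "py") = false := by simpa using h11
  have f1 : ("machine learning" == s) = false := by simpa using (Ne.symm h1)
  have f2 : ("ml" == s) = false := by simpa using (Ne.symm h2)
  have f3 : ("deep learning" == s) = false := by simpa using (Ne.symm h3)
  have f4 : ("artificial intelligence" == s) = false := by simpa using (Ne.symm h4)
  have f5 : ("data scientist" == s) = false := by simpa using (Ne.symm h5)
  have f6 : ("data science" == s) = false := by simpa using (Ne.symm h6)
  have f7 : ("research scientist" == s) = false := by simpa using (Ne.symm h7)
  have f8 : ("nlp" == s) = false := by simpa using (Ne.symm h8)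
  have f9 : ("natural language processing" == s) = false := by simpa using (Ne.symm h9)
  have f10 : ("python" == s) = false := by simpa using (Ne.symm h10)
  have f11 : ("py" == s) = false := by simpa using (Ne.symm h11)
  simp [canon, synonym_dict, hrev, PySem.Dict.getD, PySem.Dict.get?_mk_cons, PySem.Dict.get?,
        List.find?, h1, h2, h3, h4, h5, h6, h7, h8, h9, h10, h11,
        e1, e2, e3, e4, e5, e6, e7, e8, e9, e10, e11,
        f1, f2, f3, f4, f5, f6, f7, f8, f9, f10, f11]

-- A = set(map(canon, xs)) in first-occurrence order
lemma A_fold (xs : List String) (acc : List String) :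
    xs.foldl
      (fun acc skill =>
        match synonym_dict.find? (fun kv => kv.2.contains skill || skill == kv.1) with
        | some kv => PySem.Set.add acc kv.1
        | none => PySem.Set.add acc skill) acc
      = (xs.map canon).foldl PySem.Set.add acc := by
  induction xs generalizing acc with
  | nil => rfl
  | cons h t ih =>
      simp only [List.foldl, List.map]
      rw [ih]
      congr 1
      rw [← inner_eq h]
      cases synonym_dict.find? (fun kv => kv.2.contains h || h == kv.1) <;> rfl

lemma A_eq_ofList (xs : List String) :
    normalize_skills xs = PySem.Set.ofList (xs.map canon) := by
  unfold normalize_skills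
  rw [A_fold]
  rfl

-- folding Set.add appends exactly the new elements
lemma foldl_add_eq (t : List String) (acc : List String) :
    t.foldl PySem.Set.add acc = acc ++ (PySem.Set.ofList t).filter (fun e => decide (e ∉ acc)) := by
  induction t generalizing acc with
  | nil => simp [PySem.Set.ofList, PySem.Set.empty]
  | cons x t ih =>
      have hof : PySem.Set.ofList (x :: t)
          = x :: (PySem.Set.ofList t).filter (fun e => decide (e ∉ ([x] : List String))) := by
        show (x :: t).foldl PySem.Set.add [] = _
        have h1 : PySem.Set.add ([] : List String) x = [x] := rfl
        simp only [List.foldl_cons, h1, ih]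
        rfl
      simp only [List.foldl_cons]
      rw [ih (PySem.Set.add acc x), hof]
      by_cases hx : x ∈ acc
      · have hadd : PySem.Set.add acc x = acc := by simp [PySem.Set.add, hx]
        rw [hadd, List.filter_cons, List.filter_filter]
        have hpx : decide (x ∉ acc) = false := by simp [hx]
        rw [hpx]
        simp only [Bool.false_eq_true, if_false]
        congr 1
        apply List.filter_congr
        intro e _
        by_cases hex : e = x
        · subst hex; simp [hx]
        · simp [hex]
      · have hadd : PySem.Set.add acc x = acc ++ [x] := by simp [PySem.Set.add, hx]
        rw [hadd, List.filter_cons, List.filter_filter]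
        have hpx : decide (x ∉ acc) = true := by simp [hx]
        rw [hpx]
        simp only [if_true, List.append_assoc, List.singleton_append]
        congr 2
        apply List.filter_congr
        intro e _
        by_cases hex : e = x
        · subst hex; simp [hx]
        · simp [hex, List.mem_append]

-- set(l) = l for a duplicate-free l, hence set(set(b)) = set(b)
lemma foldl_add_nodup (l : List String) (acc : List String)
    (hd : ∀ x ∈ l, x ∉ acc) (hn : l.Nodup) :
    l.foldl PySem.Set.add acc = acc ++ l := by
  induction l generalizing acc with
  | nil => simp only [List.foldl_nil, List.append_nil]
  | cons x t ih =>
      have hxm : x ∉ acc := hd x (by simp)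
      have hadd : PySem.Set.add acc x = acc ++ [x] := by simp [PySem.Set.add, hxm]
      simp only [List.foldl_cons, hadd]
      rw [ih (acc ++ [x])]
      · simp
      · intro y hy
        simp only [List.mem_append, List.mem_singleton]
        rintro (h | rfl)
        · exact hd y (by simp [hy]) h
        · exact (List.nodup_cons.mp hn).1 hy
      · exact (List.nodup_cons.mp hn).2

lemma ofList_idem (b : List String) :
    PySem.Set.ofList (PySem.Set.ofList b) = PySem.Set.ofList b := by
  show (PySem.Set.ofList b).foldl PySem.Set.add [] = _
  rw [foldl_add_nodup _ [] (by simp) (PySem.Set.nodup_ofList b)]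
  simp

-- set(a ++ b) = set(a) | set(b)
lemma ofList_append (a b : List String) :
    PySem.Set.ofList (a ++ b) = PySem.Set.union (PySem.Set.ofList a) (PySem.Set.ofList b) := by
  show (a ++ b).foldl PySem.Set.add [] = (PySem.Set.ofList b).foldl PySem.Set.add (PySem.Set.ofList a)
  rw [List.foldl_append]
  show (b.foldl PySem.Set.add (PySem.Set.ofList a)) = _
  rw [foldl_add_eq, foldl_add_eq, ofList_idem]

-- B = set(map(canon, xs)) as well, by induction on the fuel
lemma altFuel_eq (fuel : Nat) : ∀ (xs : List String), xs.length ≤ fuel →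
    altFuel fuel xs = PySem.Set.ofList (xs.map canon) := by
  induction fuel with
  | zero =>
      intro xs h
      have hnil : xs = [] := List.length_eq_zero_iff.mp (Nat.le_zero.mp h)
      subst hnil
      rfl
  | succ f ih =>
      intro xs h
      by_cases h0 : xs.length = 0
      · have hnil : xs = [] := List.length_eq_zero_iff.mp h0
        subst hnil
        rfl
      · by_cases h1 : xs.length = 1
        · obtain ⟨s, hs⟩ := List.length_eq_one_iff.mp h1
          subst hs
          simp only [altFuel]
          simp [canon, PySem.Set.ofList, PySem.Set.add]
        · simp only [altFuel]
          rw [if_neg h0, if_neg h1]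
          rw [PySem.List.slice_to_natCast, PySem.List.slice_from_natCast]
          rw [ih (xs.take (xs.length / 2)) (by simp; omega),
              ih (xs.drop (xs.length / 2)) (by simp; omega)]
          rw [← ofList_append, ← List.map_append, List.take_append_drop]

lemma B_eq_ofList (xs : List String) :
    normalize_skills_alt xs = PySem.Set.ofList (xs.map canon) := by
  exact altFuel_eq xs.length xs (Nat.le_refl _)

-- ===== VERDICT (by name: the statement is the Claim_ definition above) =====
theorem normalize_skills_spec : Claim_equal_normalize_skills := by
  intro rs _
  unfold Spec_normalize_skills
  rw [A_eq_ofList, B_eq_ofList]
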